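-- pv_equiv track=rewrite | github.com/Kinrokin/KT | KT_PROD_CLEANROOM/tools/operator/cohort0_successor_master_orchestrator_tranche.py | _require_same_subject_head
-- ===== SOURCE A (Python) =====
-- from typing import Any, Dict, List, Optional, Sequence
--
-- def _require_same_subject_head(packets: Sequence[Dict[str, Any]]) -> str:
--     heads = {
--         str(packet.get("subject_head", "")).strip()
--         for packet in packets
--         if isinstance(packet, dict) and str(packet.get("subject_head", "")).strip()
--     }
--     if len(heads) != 1:
--         raise RuntimeError("FAIL_CLOSED: successor master orchestrator requires one same-head authority line")
--     return next(iter(heads))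
-- ===== SOURCE B (Python) =====
-- def _require_same_subject_head(packets):
--     head = None
--     for packet in packets:
--         if not isinstance(packet, dict):
--             continue
--         h = str(packet.get("subject_head", "")).strip()
--         if not h:
--             continue
--         if head is None:
--             head = h
--         elif h != head:
--             raise RuntimeError("FAIL_CLOSED: successor master orchestrator requires one same-head authority line")
--     if head is None:
--         raise RuntimeError("FAIL_CLOSED: successor master orchestrator requires one same-head authority line")
--     return head
-- ===== Notes on version B (the rewrite author's own statement) =====
-- stated objective: simpler
-- what changed: Replaces the set comprehension plus cardinality check with a single pass keeping one running candidate head, raising immediately on the first mismatch and after the loop if no head was found.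
import Mathlib
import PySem

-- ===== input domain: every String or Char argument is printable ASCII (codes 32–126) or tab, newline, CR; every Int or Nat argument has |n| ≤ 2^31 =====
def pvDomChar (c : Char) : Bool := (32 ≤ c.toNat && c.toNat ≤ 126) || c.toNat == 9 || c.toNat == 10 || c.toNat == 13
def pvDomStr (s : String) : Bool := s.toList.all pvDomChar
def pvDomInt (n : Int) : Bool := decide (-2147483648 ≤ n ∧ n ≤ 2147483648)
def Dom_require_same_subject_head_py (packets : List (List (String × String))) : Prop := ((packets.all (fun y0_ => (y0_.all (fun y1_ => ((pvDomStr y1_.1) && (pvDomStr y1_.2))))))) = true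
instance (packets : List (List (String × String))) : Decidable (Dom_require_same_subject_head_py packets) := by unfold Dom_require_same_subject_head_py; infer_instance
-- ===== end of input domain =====

-- B is a simpler single pass with a running candidate head instead of building a set and
-- checking its cardinality; equivalence is about the RETURN value on inputs where A returns.

-- str(packet.get("subject_head", "")).strip(), kept when nonempty (the comprehension's filter,
-- shared verbatim by both Pythons)
def pvValidHead? (p : List (String × String)) : Option String :=
  let h := PySem.Str.strip ((PySem.Dict.mk p).getD "subject_head" "")
  if h = "" then none else some h

-- ===== PORT A =====
-- the set comprehension, then len(heads) != 1 raises (modelled as "" outside Pre_), else next(iter(heads))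
def require_same_subject_head_py (packets : List (List (String × String))) : String :=
  let heads : PySem.Set String := PySem.Set.ofList (packets.filterMap pvValidHead?)
  if heads.length = 1 then heads.headD "" else ""

-- ===== PORT B =====
-- single pass: candidate head in an Option; a mismatch raises at once (modelled none → "" outside Pre_)
def pvHeadLoop (cand : Option String) : List (List (String × String)) → Option String
  | [] => cand
  | p :: ps =>
    match pvValidHead? p with
    | none => pvHeadLoop cand ps
    | some h =>
      match cand with
      | none => pvHeadLoop (some h) ps
      | some c => if h = c then pvHeadLoop cand ps else none   -- raise RuntimeError

def require_same_subject_head_py_alt (packets : List (List (String × String))) : String :=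
  match pvHeadLoop none packets with
  | some h => h
  | none => ""   -- raise RuntimeError (no head found / mismatch)

-- ===== PRECONDITION & SPEC =====
-- Pre_: the inputs on which Python A returns normally — at least one packet carries a nonempty
-- stripped subject_head, and all such heads agree (otherwise A raises RuntimeError).
def Pre_require_same_subject_head_py (packets : List (List (String × String))) : Prop :=
  let l := packets.filterMap pvValidHead?
  l ≠ [] ∧ ∀ x ∈ l, x = l.headD ""
instance (packets : List (List (String × String))) : Decidable (Pre_require_same_subject_head_py packets) := by unfold Pre_require_same_subject_head_py; infer_instance

def pvWitness_require_same_subject_head_py : (List (List (String × String))) :=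
  [[("subject_head", " alpha ")], [("other", "x")], [("subject_head", "alpha")]]

def Spec_require_same_subject_head_py (packets : List (List (String × String))) (out : String) : Prop := out = require_same_subject_head_py_alt packets
instance (packets : List (List (String × String))) (out : String) : Decidable (Spec_require_same_subject_head_py packets out) := by unfold Spec_require_same_subject_head_py; infer_instance

-- ===== CLAIM (what is proved, stated in full; the proofs are below) =====
def Claim_equal_require_same_subject_head_py : Prop := ∀ (packets : List (List (String × String))), Dom_require_same_subject_head_py packets → Pre_require_same_subject_head_py packets → Spec_require_same_subject_head_py packets (require_same_subject_head_py packets)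

-- ===== LEMMAS AND PROOFS =====

-- folding Set.add over a list of copies of an element already present changes nothing
theorem pv_foldl_add_const {l : List String} {s : PySem.Set String} {h : String}
    (hall : ∀ x ∈ l, x = h) (hmem : h ∈ s) :
    l.foldl PySem.Set.add s = s := by
  induction l generalizing s with
  | nil => rfl
  | cons a t ih =>
    have ha : a = h := hall a (by simp)
    simp only [List.foldl_cons]
    have : PySem.Set.add s a = s := by
      simp [PySem.Set.add, ha, hmem, PySem.Set.contains]
    rw [this]
    exact ih (fun x hx => hall x (by simp [hx])) hmem

theorem pv_ofList_const {t : List String} {h : String}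
    (hall : ∀ x ∈ t, x = h) : PySem.Set.ofList (h :: t) = [h] := by
  rw [PySem.Set.ofList_eq_foldl]
  simp only [List.foldl_cons]
  have h1 : PySem.Set.add ([] : PySem.Set String) h = [h] := rfl
  rw [h1]
  exact pv_foldl_add_const hall (by simp)

-- the running-candidate loop keeps its candidate when every remaining head equals it
theorem pv_loop_some {ps : List (List (String × String))} {c : String}
    (hall : ∀ x ∈ ps.filterMap pvValidHead?, x = c) :
    pvHeadLoop (some c) ps = some c := by
  induction ps with
  | nil => rfl
  | cons p ps ih =>
    simp only [pvHeadLoop]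
    cases hv : pvValidHead? p with
    | none =>
      exact ih (fun x hx => hall x (by simp [hv, hx]))
    | some h =>
      have hh : h = c := hall h (by simp [hv])
      simp only [hh]
      exact ih (fun x hx => hall x (by simp [hv, hx]))

theorem pv_loop_none {ps : List (List (String × String))} {h : String} {t : List String}
    (heq : ps.filterMap pvValidHead? = h :: t) (hall : ∀ x ∈ t, x = h) :
    pvHeadLoop none ps = some h := by
  induction ps generalizing t with
  | nil => simp at heq
  | cons p ps ih =>
    simp only [pvHeadLoop]
    cases hv : pvValidHead? p with
    | none =>
      rw [List.filterMap_cons, hv] at heq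
      exact ih heq hall
    | some h' =>
      rw [List.filterMap_cons, hv] at heq
      obtain ⟨hh, ht⟩ := List.cons.injEq .. ▸ heq
      subst hh
      exact pv_loop_some (fun x hx => hall x (ht ▸ hx))

-- ===== VERDICT (by name: the statement is the Claim_ definition above) =====
theorem require_same_subject_head_py_spec : Claim_equal_require_same_subject_head_py := by
  intro packets _ hpre
  obtain ⟨hne, hall⟩ := hpre
  unfold Spec_require_same_subject_head_py
  cases heq : packets.filterMap pvValidHead? with
  | nil => exact absurd heq hne
  | cons h t =>
    have hhd : (packets.filterMap pvValidHead?).headD "" = h := by rw [heq]; rfl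
    have hall' : ∀ x ∈ t, x = h := by
      intro x hx
      have := hall x (by rw [heq]; simp [hx])
      rwa [hhd] at this
    have hA : require_same_subject_head_py packets = h := by
      unfold require_same_subject_head_py
      rw [heq, pv_ofList_const hall']
      rfl
    have hB : require_same_subject_head_py_alt packets = h := by
      simp [require_same_subject_head_py_alt, pv_loop_none heq hall']
    rw [hA, hB]
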